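-- pv_equiv track=rewrite | github.com/tigor7/AP | navidad/memoization/solve.py | solve
-- ===== SOURCE A (Python) =====
-- def solve(p, q):
--     mem = {}
--     def memSolve(p, q):
--         if (p, q) not in mem:
--             if p == q:
--                 mem[(p, q)] = 1
--             else:
--                 s = 0
--                 for k in range(p, q):
--                     s += memSolve(p, k) + memSolve(k + 1, q)
--                 mem[(p, q)] = max(memSolve(p+1, q), s)
--         return mem[(p, q)]
--
--     memSolve(p, q)
--     return mem[(p, q)]
-- ===== SOURCE B (Python) =====
-- def solve(p, q):
--     # Closed form for the interval recurrence g(n) = max(g(n-1), 2*sum_{i<n} g(i)),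
--     # g(1) = 1, which yields g(n) = 2*3^(n-2) for n >= 2.
--     if p == q:
--         return 1
--     return 2 * 3 ** (q - p - 1)
-- ===== Notes on version B (the rewrite author's own statement) =====
-- stated objective: faster
-- what changed: Replaces the memoized O(n^3) interval recursion by the closed form 2*3^(q-p-1) (1 when p==q), derived from the recurrence g(n)=max(g(n-1), 2*sum_{i<n} g(i)).
import Mathlib
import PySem

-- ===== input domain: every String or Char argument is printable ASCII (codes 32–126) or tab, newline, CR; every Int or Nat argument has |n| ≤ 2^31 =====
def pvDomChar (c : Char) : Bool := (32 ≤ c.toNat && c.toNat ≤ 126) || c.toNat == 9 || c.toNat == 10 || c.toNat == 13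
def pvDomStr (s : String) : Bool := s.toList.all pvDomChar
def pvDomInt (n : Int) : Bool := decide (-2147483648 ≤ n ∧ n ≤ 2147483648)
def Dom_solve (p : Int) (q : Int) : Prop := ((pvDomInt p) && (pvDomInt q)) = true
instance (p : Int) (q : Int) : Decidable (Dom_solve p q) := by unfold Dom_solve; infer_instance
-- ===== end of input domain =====

-- B replaces A's memoized O(n^3) interval recursion by the closed form 2*3^(q-p-1)
-- (1 when p = q); objective: faster (asymptotic).

-- ===== PORT A =====
-- memSolve with the memo dict `mem` threaded through; `fuel` only makes the
-- recursion structurally total (for p ≤ q the recursion depth is < (q-p)+1, so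
-- fuel is never exhausted; for p > q Python A diverges — excluded by Pre_).
def memSolveA (fuel : Nat) (mem : Std.HashMap (Int × Int) Int) (p q : Int) :
    Std.HashMap (Int × Int) Int × Int :=
  match fuel with
  | 0 => (mem, 0)  -- unreachable under Pre_solve
  | fuel + 1 =>
    match mem[(p, q)]? with
    | some v => (mem, v)                       -- memo hit: return mem[(p, q)]
    | none =>
      if p = q then
        let mem' := mem.insert (p, q) 1        -- mem[(p,q)] = 1
        (mem', mem'.getD (p, q) 0)             -- return mem[(p,q)] (just inserted, so present)
      else
        -- s = 0; for k in range(p, q): s += memSolve(p, k) + memSolve(k+1, q)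
        let st := (PySem.List.pyRange p q 1).foldl
          (fun acc k =>
            let r1 := memSolveA fuel acc.1 p k
            let r2 := memSolveA fuel r1.1 (k + 1) q
            (r2.1, acc.2 + (r1.2 + r2.2))) (mem, (0 : Int))
        -- mem[(p,q)] = max(memSolve(p+1, q), s)
        let rm := memSolveA fuel st.1 (p + 1) q
        let mem' := rm.1.insert (p, q) (max rm.2 st.2)
        (mem', mem'.getD (p, q) 0)             -- return mem[(p,q)] (just inserted, so present)

def solve (p : Int) (q : Int) : Int :=
  -- mem = {}; memSolve(p, q); return mem[(p, q)]  (key present whenever A returns)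
  let r := memSolveA ((q - p).toNat + 1) (∅ : Std.HashMap (Int × Int) Int) p q
  r.1.getD (p, q) 0

-- ===== PORT B =====
def solve_alt (p : Int) (q : Int) : Int :=
  if p = q then 1 else 2 * 3 ^ (q - p - 1).toNat

-- ===== PRECONDITION & SPEC =====
-- Pre_ excludes p > q, on which A recurses forever (RecursionError).
def Pre_solve (p : Int) (q : Int) : Prop := p ≤ q
instance (p : Int) (q : Int) : Decidable (Pre_solve p q) := by unfold Pre_solve; infer_instance
def pvWitness_solve : Int × Int := (2, 5)

def Spec_solve (p : Int) (q : Int) (out : Int) : Prop := out = solve_alt p q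
instance (p : Int) (q : Int) (out : Int) : Decidable (Spec_solve p q out) := by unfold Spec_solve; infer_instance

-- ===== CLAIM (what is proved, stated in full; the proofs are below) =====
def Claim_equal_solve : Prop := ∀ (p : Int) (q : Int), Dom_solve p q → Pre_solve p q → Spec_solve p q (solve p q)

-- ===== LEMMAS AND PROOFS =====

-- every value stored in the memo is the closed-form value of its interval
def GoodMem (mem : Std.HashMap (Int × Int) Int) : Prop :=
  ∀ a b v, mem[(a, b)]? = some v → v = solve_alt a b

lemma sum1 : ∀ (n : Nat) (p q : Int), q - p = (n : Int) + 1 →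
    ((PySem.List.pyRange p q 1).map (fun k => solve_alt p k)).sum = 3 ^ n := by
  intro n
  induction n with
  | zero =>
    intro p q h
    have hq : q = p + 1 := by omega
    subst hq
    simp [PySem.List.pyRange_one_singleton, solve_alt]
  | succ n ih =>
    intro p q h
    have h1 : p ≤ q - 1 := by omega
    have hr : PySem.List.pyRange p q 1 = PySem.List.pyRange p (q - 1) 1 ++ [q - 1] := by
      have := PySem.List.pyRange_one_succ_right (a := p) (b := q - 1) h1
      simpa [show q - 1 + 1 = q by ring] using this
    rw [hr, List.map_append, List.sum_append, ih p (q - 1) (by omega)]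
    have hne : p ≠ q - 1 := by omega
    have : solve_alt p (q - 1) = 2 * 3 ^ n := by
      simp [solve_alt, hne, show (q - 1 - p - 1).toNat = n by omega]
    simp [this]; ring

lemma sum2 : ∀ (n : Nat) (p q : Int), q - p = (n : Int) + 1 →
    ((PySem.List.pyRange p q 1).map (fun k => solve_alt (k + 1) q)).sum = 3 ^ n := by
  intro n
  induction n with
  | zero =>
    intro p q h
    have hq : q = p + 1 := by omega
    subst hq
    simp [PySem.List.pyRange_one_singleton, solve_alt]
  | succ n ih =>
    intro p q h
    rw [PySem.List.pyRange_one_cons (by omega : p < q), List.map_cons, List.sum_cons,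
      ih (p + 1) q (by omega)]
    have hne : p + 1 ≠ q := by omega
    have : solve_alt (p + 1) q = 2 * 3 ^ n := by
      simp [solve_alt, hne, show (q - (p + 1) - 1).toNat = n by omega]
    simp [this]; ring

-- the recurrence value equals the closed form
lemma key_max (p q : Int) (h : p < q) :
    max (solve_alt (p + 1) q)
      (((PySem.List.pyRange p q 1).map (fun k => solve_alt p k + solve_alt (k + 1) q)).sum)
      = solve_alt p q := by
  set n : Nat := (q - p - 1).toNat with hn
  have hqp : q - p = (n : Int) + 1 := by omega
  have hs : ((PySem.List.pyRange p q 1).map (fun k => solve_alt p k + solve_alt (k + 1) q)).sum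
      = 2 * 3 ^ n := by
    rw [PySem.List.sum_map_add_int, sum1 n p q hqp, sum2 n p q hqp]; ring
  rw [hs]
  have hpq : p ≠ q := by omega
  by_cases h1 : p + 1 = q
  · have hn0 : n = 0 := by omega
    norm_num [solve_alt, h1, hpq, hn0, show (q - p).toNat - 1 = 0 by omega]
  · have he : solve_alt (p + 1) q = 2 * 3 ^ ((q - p - 2).toNat) := by
      simp [solve_alt, h1]
      omega
    rw [he]
    have hln : (3 : Int) ^ ((q - p - 2).toNat) ≤ 3 ^ n := by
      exact_mod_cast Nat.pow_le_pow_right (by norm_num : 1 ≤ 3)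
        (show (q - p - 2).toNat ≤ n by omega)
    rw [max_eq_right (by linarith)]
    simp only [solve_alt, if_neg hpq]
    rw [hn]

lemma memA_good : ∀ (fuel : Nat) (p q : Int) (mem : Std.HashMap (Int × Int) Int),
    GoodMem mem → p ≤ q → (q - p).toNat < fuel →
    GoodMem (memSolveA fuel mem p q).1 ∧
    (memSolveA fuel mem p q).1[(p, q)]? = some (solve_alt p q) ∧
    (memSolveA fuel mem p q).2 = solve_alt p q := by
  intro fuel
  induction fuel with
  | zero => intro p q mem _ _ h; omega
  | succ fuel ih =>
    intro p q mem hg hpq hfuel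
    cases hmem : mem[(p, q)]? with
    | some v =>
      have hv := hg p q v hmem
      simp [memSolveA, hmem, hv, hg]
    | none =>
      by_cases hpq' : p = q
      · subst hpq'
        simp only [memSolveA, hmem]
        rw [if_pos trivial]
        refine ⟨?_, ?_, ?_⟩
        · intro a b v hv
          rw [Std.HashMap.getElem?_insert] at hv
          by_cases hab : (p, p) = (a, b)
          · rw [if_pos (by exact beq_iff_eq.mpr hab)] at hv
            cases hab
            simpa [solve_alt] using hv.symm
          · rw [if_neg (by simpa using hab)] at hv; exact hg a b v hv
        · rw [Std.HashMap.getElem?_insert_self]; simp [solve_alt]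
        · rw [Std.HashMap.getD_eq_getD_getElem?, Std.HashMap.getElem?_insert_self]
          simp [solve_alt]
      · have hlt : p < q := lt_of_le_of_ne hpq hpq'
        -- the fold over range(p, q)
        have fold : ∀ (L : List Int), (∀ k ∈ L, p ≤ k ∧ k < q) →
            ∀ (m : Std.HashMap (Int × Int) Int) (s : Int), GoodMem m →
            GoodMem ((L.foldl (fun acc k =>
              let r1 := memSolveA fuel acc.1 p k
              let r2 := memSolveA fuel r1.1 (k + 1) q
              (r2.1, acc.2 + (r1.2 + r2.2))) (m, s)).1) ∧
            (L.foldl (fun acc k =>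
              let r1 := memSolveA fuel acc.1 p k
              let r2 := memSolveA fuel r1.1 (k + 1) q
              (r2.1, acc.2 + (r1.2 + r2.2))) (m, s)).2
              = s + (L.map (fun k => solve_alt p k + solve_alt (k + 1) q)).sum := by
          intro L
          induction L with
          | nil => intro _ m s hm; exact ⟨hm, by simp⟩
          | cons k L ihL =>
            intro hk m s hm
            obtain ⟨hk1, hk2⟩ := hk k (by simp)
            have h1 := ih p k m hm hk1 (by omega)
            have h2 := ih (k + 1) q (memSolveA fuel m p k).1 h1.1 (by omega) (by omega)
            have hrest := ihL (fun x hx => hk x (by simp [hx]))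
              (memSolveA fuel (memSolveA fuel m p k).1 (k + 1) q).1
              (s + ((memSolveA fuel m p k).2 + (memSolveA fuel (memSolveA fuel m p k).1 (k + 1) q).2))
              h2.1
            simp only [List.foldl_cons]
            refine ⟨hrest.1, ?_⟩
            rw [hrest.2, h1.2.2, h2.2.2]
            simp [List.sum_cons]; ring
        have hall : ∀ k ∈ PySem.List.pyRange p q 1, p ≤ k ∧ k < q := by
          intro k hk; exact (PySem.List.mem_pyRange_one.mp hk)
        have hfold := fold (PySem.List.pyRange p q 1) hall mem 0 hg
        simp only [memSolveA, hmem]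
        rw [if_neg hpq']
        set st := (PySem.List.pyRange p q 1).foldl (fun acc k =>
              let r1 := memSolveA fuel acc.1 p k
              let r2 := memSolveA fuel r1.1 (k + 1) q
              (r2.1, acc.2 + (r1.2 + r2.2))) (mem, (0 : Int)) with hst
        have hrm := ih (p + 1) q st.1 hfold.1 (by omega) (by omega)
        have hval : max (memSolveA fuel st.1 (p + 1) q).2 st.2 = solve_alt p q := by
          rw [hrm.2.2, hfold.2]
          simpa using key_max p q hlt
        refine ⟨?_, ?_, ?_⟩
        · intro a b v hv
          rw [Std.HashMap.getElem?_insert] at hv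
          by_cases hab : (p, q) = (a, b)
          · rw [if_pos (by exact beq_iff_eq.mpr hab)] at hv
            cases hab
            rw [← hval]; exact (Option.some.inj hv).symm
          · rw [if_neg (by simpa using hab)] at hv; exact hrm.1 a b v hv
        · rw [Std.HashMap.getElem?_insert_self, hval]
        · rw [Std.HashMap.getD_eq_getD_getElem?, Std.HashMap.getElem?_insert_self, hval]
          rfl

-- ===== VERDICT (by name: the statement is the Claim_ definition above) =====
theorem solve_spec : Claim_equal_solve := by
  intro p q _ hpre
  unfold Spec_solve solve
  have hg : GoodMem (∅ : Std.HashMap (Int × Int) Int) := by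
    intro a b v hv; simp at hv
  have h := memA_good ((q - p).toNat + 1) p q (∅ : Std.HashMap (Int × Int) Int) hg hpre (by omega)
  show (memSolveA ((q - p).toNat + 1) (∅ : Std.HashMap (Int × Int) Int) p q).1.getD (p, q) 0
      = solve_alt p q
  rw [Std.HashMap.getD_eq_getD_getElem?, h.2.1]
  rfl
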